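-- pv_equiv track=rewrite | github.com/peacexie/python | app/libs/rands.py | strg
-- ===== SOURCE A (Python) =====
-- def strg(s0, rn, cm, sub=0):
--     slen = len(s0); re = {}
--     no = 0; ino = 1
--     while no<slen:
--         istr = s0[no:rn+no]
--         re[ino] = istr if sub else strg(istr, cm, 0, 1)
--         no += rn
--         ino += 1
--     return re
-- ===== SOURCE B (Python) =====
-- def strg(s0, rn, cm, sub=0):
--     # single pass over the characters: each char is routed by index arithmetic
--     # into its (outer, inner) bucket; no slicing, no recursion
--     if sub:
--         re = {}
--         for i, ch in enumerate(s0):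
--             k = i // rn + 1
--             re[k] = re.get(k, '') + ch
--         return re
--     re = {}
--     for i, ch in enumerate(s0):
--         k = i // rn + 1
--         j = i % rn // cm + 1
--         d = re.get(k, {})
--         d[j] = d.get(j, '') + ch
--         re[k] = d
--     return re
-- ===== Notes on version B (the rewrite author's own statement) =====
-- stated objective: alternative
-- what changed: Replaces A's slice-and-recurse chunking (while loop with cursors, self-recursion under a flag) by a single pass over the characters that routes each char by index arithmetic (i//rn, i%rn//cm) into its nested bucket via dict accumulation; no slicing and no recursion.
-- outside the precondition, e.g. on strg('ab', 1, 1, 1): A returns {1: 'a', 2: 'b'}, B returns {1: 'a', 2: 'b'}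
import Mathlib
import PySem

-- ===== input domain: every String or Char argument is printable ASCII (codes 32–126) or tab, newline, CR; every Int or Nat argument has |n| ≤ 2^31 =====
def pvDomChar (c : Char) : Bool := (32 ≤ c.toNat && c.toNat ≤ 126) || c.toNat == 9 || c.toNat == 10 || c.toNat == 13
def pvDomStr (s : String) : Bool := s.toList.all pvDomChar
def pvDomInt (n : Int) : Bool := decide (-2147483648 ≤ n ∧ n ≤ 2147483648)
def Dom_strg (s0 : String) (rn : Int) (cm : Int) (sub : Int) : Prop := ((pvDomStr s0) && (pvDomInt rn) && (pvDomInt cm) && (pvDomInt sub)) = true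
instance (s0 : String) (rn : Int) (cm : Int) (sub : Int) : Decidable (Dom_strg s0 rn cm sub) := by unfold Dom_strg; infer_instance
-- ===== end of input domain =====

-- B replaces A's slice-and-recurse chunking by a single pass over the characters that routes
-- each char by index arithmetic into its nested bucket (objective: alternative). Return values
-- only; neither version mutates its arguments.

-- ===== PORT A =====
-- A is ONE self-recursive Python function whose dict values are strings when sub is truthy and
-- dicts when sub is 0; Lean's typing forces the two uses of the SAME loop body into a helper
-- generic in the value stored for each chunk. Python's `re[ino] = v` on the fresh, strictly
-- increasing keys ino = 1,2,… is exactly an append to the dict's items list, ported `acc ++ [(ino, v)]`.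
-- The while loop `no < slen … no += rn` is ported with fuel `slen + 1`, enough for every input
-- admitted by Pre_strg (size ≥ 1, so at most slen iterations; Python diverges where fuel runs out).
def strgLoopA {X : Type} (val : String → X) (s : List Char) (size : Int)
    (no ino : Int) (fuel : Nat) (acc : List (Int × X)) : List (Int × X) :=
  match fuel with
  | 0 => acc
  | f + 1 =>
    if no < (s.length : Int) then
      let istr := String.ofList (PySem.List.slice s (some no) (some (size + no)))
      strgLoopA val s size (no + size) (ino + 1) f (acc ++ [(ino, val istr)])
    else acc

-- the recursive call strg(istr, cm, 0, 1): the sub-truthy branch, values are the chunks themselves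
def strgInner (s0 : String) (cm : Int) : List (Int × String) :=
  strgLoopA (fun istr => istr) s0.toList cm 0 1 (s0.toList.length + 1) []

-- sub = 0 path (a sub ≠ 0 top-level call returns a dict of strings, which is not a value of the
-- declared type List (Int × List (Int × String)); Pre_strg excludes it except for empty s0)
def strg (s0 : String) (rn : Int) (cm : Int) (sub : Int) : List (Int × List (Int × String)) :=
  strgLoopA (fun istr => strgInner istr cm) s0.toList rn 0 1 (s0.toList.length + 1) []

-- ===== PORT B =====
-- Source B's loop body: k = i//rn + 1; j = i%rn//cm + 1; d = re.get(k, {}); d[j] = d.get(j,'') + ch;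
-- re[k] = d.  The growing Python strings are carried as their char lists (a Python str IS its
-- sequence of chars) and rendered with String.ofList in the final map, which also transcribes
-- Source B's dict-of-dicts into the association-list convention.
def strgAltStep (rn cm : Int) (re : PySem.Dict Int (PySem.Dict Int (List Char)))
    (p : Int × Char) : PySem.Dict Int (PySem.Dict Int (List Char)) :=
  let k := PySem.Int.floordiv p.1 rn + 1
  let j := PySem.Int.floordiv (PySem.Int.mod p.1 rn) cm + 1
  let d := re.getD k PySem.Dict.empty
  re.insert k (d.insert j (d.getD j [] ++ [p.2]))

-- Source B's sub ≠ 0 branch returns a dict of strings — not a value of the declared dict-of-dicts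
-- type; Pre_strg admits sub ≠ 0 only for empty s0, where both branches return the empty dict,
-- so the port transcribes the sub = 0 loop.
def strg_alt (s0 : String) (rn : Int) (cm : Int) (sub : Int) : List (Int × List (Int × String)) :=
  ((PySem.List.enumerate s0.toList 0).foldl (strgAltStep rn cm) PySem.Dict.empty).items.map
    (fun p => (p.1, p.2.items.map (fun q => (q.1, String.ofList q.2))))

-- ===== PRECONDITION & SPEC =====
-- Pre_ excludes sub ≠ 0 with nonempty s0, where A returns a dict of strings — not a value of
-- the declared dict-of-dicts type, hence unportable — and nonpositive chunk sizes with a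
-- nonempty string, where A's while loop never terminates.
def Pre_strg (s0 : String) (rn : Int) (cm : Int) (sub : Int) : Prop :=
  s0.toList = [] ∨ (sub = 0 ∧ 1 ≤ rn ∧ 1 ≤ cm)
instance (s0 : String) (rn : Int) (cm : Int) (sub : Int) : Decidable (Pre_strg s0 rn cm sub) := by
  unfold Pre_strg; infer_instance

def pvWitness_strg : String × Int × Int × Int := ("hello world", 4, 2, 0)

def Spec_strg (s0 : String) (rn : Int) (cm : Int) (sub : Int) (out : List (Int × List (Int × String))) : Prop := out = strg_alt s0 rn cm sub
instance (s0 : String) (rn : Int) (cm : Int) (sub : Int) (out : List (Int × List (Int × String))) : Decidable (Spec_strg s0 rn cm sub out) := by unfold Spec_strg; infer_instance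

-- ===== CLAIM (what is proved, stated in full; the proofs are below) =====
def Claim_equal_strg : Prop := ∀ (s0 : String) (rn : Int) (cm : Int) (sub : Int), Dom_strg s0 rn cm sub → Pre_strg s0 rn cm sub → Spec_strg s0 rn cm sub (strg s0 rn cm sub)

-- ===== LEMMAS AND PROOFS =====

-- recursive specification of Python's stride-chunking, peeled from the front
def chunkSpec (l : List Char) (sz : Nat) (ino : Int) : List (Int × List Char) :=
  if h : l = [] ∨ sz = 0 then []
  else (ino, l.take sz) :: chunkSpec (l.drop sz) sz (ino + 1)
termination_by l.length
decreasing_by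
  push_neg at h
  have h1 : l.length ≠ 0 := by simpa using h.1
  simp [List.length_drop]; omega

theorem chunkSpec_nil (sz : Nat) (ino : Int) : chunkSpec [] sz ino = [] := by
  rw [chunkSpec]; simp

theorem chunkSpec_cons (l : List Char) (sz : Nat) (ino : Int) (hl : l ≠ []) (hsz : sz ≠ 0) :
    chunkSpec l sz ino = (ino, l.take sz) :: chunkSpec (l.drop sz) sz (ino + 1) := by
  rw [chunkSpec]; simp [hl, hsz]

-- A's loop computes the chunkSpec of the suffix it has not yet visited
theorem strgLoopA_eq_chunkSpec {X : Type} (val : String → X) (sz : Nat) (hsz : 1 ≤ sz) :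
    ∀ (fuel j : Nat) (l : List Char) (ino : Int) (acc : List (Int × X)),
      l.length ≤ j + fuel →
      strgLoopA val l (sz : Int) (j : Int) ino fuel acc
        = acc ++ (chunkSpec (l.drop j) sz ino).map (fun p => (p.1, val (String.ofList p.2))) := by
  intro fuel
  induction fuel with
  | zero =>
    intro j l ino acc hle
    have hd : l.drop j = [] := List.drop_eq_nil_of_le (by omega)
    simp [strgLoopA, hd, chunkSpec_nil]
  | succ f ih =>
    intro j l ino acc hle
    by_cases hj : (j : Int) < (l.length : Int)
    · have hjn : j < l.length := by exact_mod_cast hj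
      rw [strgLoopA]
      simp only [hj, if_pos]
      have hslice : PySem.List.slice l (some (j : Int)) (some ((sz : Int) + (j : Int)))
          = (l.drop j).take sz := by
        rw [show (sz : Int) + (j : Int) = (j : Int) + (sz : Int) from by ring]
        exact PySem.List.slice_natCast_add l j sz
      have hcast : (j : Int) + (sz : Int) = ((j + sz : Nat) : Int) := by push_cast; ring
      rw [hslice, hcast, ih (j + sz) l (ino + 1) _ (by omega)]
      have hne : l.drop j ≠ [] := by
        intro h0
        have := List.drop_eq_nil_iff.mp h0
        omega
      rw [chunkSpec_cons (l.drop j) sz ino hne (by omega)]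
      simp [List.drop_drop]
    · have hd : l.drop j = [] := List.drop_eq_nil_of_le (by omega)
      rw [strgLoopA]
      simp [hj, hd, chunkSpec_nil]

-- ceiling division, and the canonical range-indexed chunk list both proofs meet at
def cdiv (a b : Nat) : Nat := (a + b - 1) / b

def chunksC (l : List Char) (sz : Nat) : List (Int × List Char) :=
  (List.range (cdiv l.length sz)).map (fun (i : Nat) => (1 + (i : Int), (l.drop (i * sz)).take sz))

theorem cdiv_zero (sz : Nat) (h : 1 ≤ sz) : cdiv 0 sz = 0 := by
  unfold cdiv
  exact Nat.div_eq_of_lt (by omega)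

theorem cdiv_succ (m sz : Nat) (h : 1 ≤ sz) : cdiv (m + 1) sz = m / sz + 1 := by
  unfold cdiv
  rw [show m + 1 + sz - 1 = m + sz from by omega, Nat.add_div_right _ (by omega)]

theorem cdiv_of_dvd (m sz : Nat) (h : 1 ≤ sz) (hd : m % sz = 0) : cdiv m sz = m / sz := by
  unfold cdiv
  have hq := Nat.div_add_mod m sz
  have h2 : m + sz - 1 = (sz - 1) + sz * (m / sz) := by omega
  rw [h2, Nat.add_mul_div_left _ _ (by omega : 0 < sz), Nat.div_eq_of_lt (by omega)]
  omega

theorem cdiv_of_not_dvd (m sz : Nat) (h : 1 ≤ sz) (hd : m % sz ≠ 0) : cdiv m sz = m / sz + 1 := by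
  unfold cdiv
  have hq := Nat.div_add_mod m sz
  have hlt : m % sz < sz := Nat.mod_lt _ (by omega)
  have h2 : m + sz - 1 = (m % sz - 1) + sz * (m / sz + 1) := by
    rw [Nat.mul_add, Nat.mul_one]; omega
  rw [h2, Nat.add_mul_div_left _ _ (by omega : 0 < sz), Nat.div_eq_of_lt (by omega)]
  omega

theorem cdiv_one (sz : Nat) (h : 1 ≤ sz) : cdiv 1 sz = 1 := by
  unfold cdiv
  rw [show 1 + sz - 1 = sz from by omega, Nat.div_self (by omega)]

-- the last (possibly partial) chunk's length is the remainder
theorem drop_div_mul_length (l : List Char) (sz : Nat) (h : 1 ≤ sz) :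
    (l.drop (l.length / sz * sz)).length = l.length % sz := by
  have hq := Nat.div_add_mod l.length sz
  have hc : l.length / sz * sz = sz * (l.length / sz) := Nat.mul_comm _ _
  rw [List.length_drop, hc]
  omega

-- the canonical range-indexed form is chunkSpec (generalised over the start index)
theorem map_range_eq_chunkSpec (sz : Nat) (hsz : 1 ≤ sz) :
    ∀ (n : Nat) (l : List Char), l.length ≤ n → ∀ (ino : Int),
      (List.range (cdiv l.length sz)).map
          (fun (k : Nat) => (ino + (k : Int), (l.drop (k * sz)).take sz))
        = chunkSpec l sz ino := by
  intro n
  induction n with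
  | zero =>
    intro l hl ino
    have hnil : l = [] := List.length_eq_zero_iff.mp (by omega)
    subst hnil
    simp [cdiv_zero sz hsz, chunkSpec_nil]
  | succ n ih =>
    intro l hl ino
    rcases eq_or_ne l [] with hnil | hne
    · subst hnil
      simp [cdiv_zero sz hsz, chunkSpec_nil]
    · have hlen : 1 ≤ l.length := by
        cases l with
        | nil => exact absurd rfl hne
        | cons a t => simp
      have hstep : cdiv l.length sz = (l.length - 1) / sz + 1 := by
        have h := cdiv_succ (l.length - 1) sz hsz
        rw [show l.length - 1 + 1 = l.length from by omega] at h
        exact h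
      rw [hstep, List.range_succ_eq_map, List.map_cons, List.map_map]
      rw [chunkSpec_cons l sz ino hne (by omega)]
      have hhead : (ino + ((0 : Nat) : Int), (l.drop (0 * sz)).take sz)
          = (ino, l.take sz) := by simp
      rw [hhead]
      congr 1
      have hdroplen : (l.drop sz).length = l.length - sz := by simp
      have hc : cdiv (l.drop sz).length sz = (l.length - 1) / sz := by
        rw [hdroplen]
        rcases Nat.lt_or_ge (l.length - 1) sz with hsmall | hbig
        · rw [show l.length - sz = 0 from by omega, cdiv_zero sz hsz,
            Nat.div_eq_of_lt hsmall]
        · rw [show l.length - sz = (l.length - sz - 1) + 1 from by omega, cdiv_succ _ sz hsz,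
            show l.length - 1 = (l.length - sz - 1) + sz from by omega,
            Nat.add_div_right _ (by omega)]
      have hrec := ih (l.drop sz) (by simp; omega) (ino + 1)
      rw [hc] at hrec
      rw [← hrec]
      apply List.map_congr_left
      intro k _
      simp only [Function.comp_apply, Prod.mk.injEq]
      refine ⟨by push_cast; ring, ?_⟩
      rw [List.drop_drop]
      have e : k.succ * sz = sz + k * sz := by rw [Nat.succ_eq_add_one]; ring
      rw [e]

theorem chunksC_eq_chunkSpec (l : List Char) (sz : Nat) (hsz : 1 ≤ sz) :
    chunksC l sz = chunkSpec l sz 1 := by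
  unfold chunksC
  exact map_range_eq_chunkSpec sz hsz l.length l (le_refl _) 1

-- full chunks are untouched by appending a char
theorem chunk_stable (l : List Char) (c : Char) (a b : Nat) (h : a + b ≤ l.length) :
    ((l ++ [c]).drop a).take b = (l.drop a).take b := by
  rw [List.drop_append_of_le_length (by omega), List.take_append_of_le_length (by simp; omega)]

-- snoc lemma, divisible case: the appended char opens a fresh chunk
theorem chunksC_snoc_dvd (l : List Char) (c : Char) (sz : Nat) (hsz : 1 ≤ sz)
    (hd : l.length % sz = 0) :
    chunksC (l ++ [c]) sz = chunksC l sz ++ [(1 + ((l.length / sz : Nat) : Int), [c])] := by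
  unfold chunksC
  have hq := Nat.div_add_mod l.length sz
  rw [List.length_append, List.length_singleton, cdiv_succ _ sz hsz, cdiv_of_dvd _ sz hsz hd,
    List.range_succ, List.map_append, List.map_singleton]
  congr 1
  · apply List.map_congr_left
    intro i hi
    have hi' : i < l.length / sz := List.mem_range.mp hi
    have hle : i * sz + sz ≤ l.length := by
      have h1 : (i + 1) * sz ≤ (l.length / sz) * sz := Nat.mul_le_mul_right _ (by omega)
      have h2 : (l.length / sz) * sz ≤ l.length := Nat.div_mul_le_self _ _
      nlinarith
    rw [chunk_stable l c _ sz hle]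
  · have hmul : (l.length / sz) * sz = l.length := by
      have hc : l.length / sz * sz = sz * (l.length / sz) := Nat.mul_comm _ _
      omega
    rw [hmul, List.drop_append_of_le_length (le_refl _), List.drop_length, List.nil_append,
      List.take_of_length_le (by simp; omega)]

-- snoc lemma, non-divisible case: the appended char grows the (partial) last chunk
theorem chunksC_snoc_not_dvd (l : List Char) (c : Char) (sz : Nat) (hsz : 1 ≤ sz)
    (hd : l.length % sz ≠ 0) :
    chunksC l sz = (List.range (l.length / sz)).map
        (fun (i : Nat) => (1 + (i : Int), (l.drop (i * sz)).take sz))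
      ++ [(1 + ((l.length / sz : Nat) : Int), l.drop (l.length / sz * sz))]
    ∧ chunksC (l ++ [c]) sz = (List.range (l.length / sz)).map
        (fun (i : Nat) => (1 + (i : Int), (l.drop (i * sz)).take sz))
      ++ [(1 + ((l.length / sz : Nat) : Int), l.drop (l.length / sz * sz) ++ [c])] := by
  have hq := Nat.div_add_mod l.length sz
  have hlt : l.length % sz < sz := Nat.mod_lt _ (by omega)
  have hmle : l.length / sz * sz ≤ l.length := Nat.div_mul_le_self _ _
  have hfull : ∀ i ∈ List.range (l.length / sz), i * sz + sz ≤ l.length := by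
    intro i hi
    have hi' : i < l.length / sz := List.mem_range.mp hi
    have h1 : (i + 1) * sz ≤ (l.length / sz) * sz := Nat.mul_le_mul_right _ (by omega)
    nlinarith
  have hdroplen := drop_div_mul_length l sz hsz
  constructor
  · unfold chunksC
    rw [cdiv_of_not_dvd _ sz hsz hd, List.range_succ, List.map_append, List.map_singleton]
    congr 1
    rw [List.take_of_length_le (by rw [hdroplen]; omega)]
  · unfold chunksC
    rw [List.length_append, List.length_singleton, cdiv_succ _ sz hsz,
      List.range_succ, List.map_append, List.map_singleton]
    congr 1
    · apply List.map_congr_left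
      intro i hi
      rw [chunk_stable l c _ sz (hfull i hi)]
    · rw [List.drop_append_of_le_length hmle,
        List.take_of_length_le (by simp [hdroplen]; omega)]

-- membership shape of chunksC's entries (keys are 1, 2, …, cdiv len sz)
theorem mem_chunksC (l : List Char) (sz : Nat) (p : Int × List Char) (h : p ∈ chunksC l sz) :
    ∃ i < cdiv l.length sz, p.1 = 1 + (i : Int) := by
  unfold chunksC at h
  obtain ⟨i, hi, hp⟩ := List.mem_map.mp h
  exact ⟨i, List.mem_range.mp hi, by rw [← hp]⟩

-- the one-char string is a single chunk
theorem chunksC_single (c : Char) (sz : Nat) (hsz : 1 ≤ sz) :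
    chunksC [c] sz = [(1, [c])] := by
  unfold chunksC
  rw [List.length_singleton, cdiv_one sz hsz]
  simp [List.take_of_length_le (by simp; omega : ([c] : List Char).length ≤ sz)]

-- ---- association-list facts about PySem.Dict.mk with a distinguished last key ----
theorem dict_contains_false {ν : Type} (its : List (Int × ν)) (k : Int)
    (h : ∀ p ∈ its, p.1 ≠ k) : (PySem.Dict.mk its).contains k = false := by
  rw [PySem.Dict.contains_eq_decide_mem_keys, PySem.Dict.keys_mk]
  simp only [decide_eq_false_iff_not, List.mem_map]
  rintro ⟨p, hp, hpk⟩
  exact h p hp hpk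

theorem dict_getD_last {ν : Type} (its : List (Int × ν)) (k : Int) (v d0 : ν)
    (h : ∀ p ∈ its, p.1 ≠ k) : (PySem.Dict.mk (its ++ [(k, v)])).getD k d0 = v := by
  induction its with
  | nil => simp [PySem.Dict.getD_eq_get?_getD, PySem.Dict.get?_mk_cons]
  | cons q rest ih =>
    obtain ⟨qk, qv⟩ := q
    have hq : qk ≠ k := h (qk, qv) (by simp)
    rw [List.cons_append, PySem.Dict.getD_eq_get?_getD, PySem.Dict.get?_mk_cons,
      if_neg (by simpa using hq), ← PySem.Dict.getD_eq_get?_getD]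
    exact ih (fun p hp => h p (List.mem_cons_of_mem _ hp))

theorem dict_insert_fresh {ν : Type} (its : List (Int × ν)) (k : Int) (v : ν)
    (h : ∀ p ∈ its, p.1 ≠ k) :
    (PySem.Dict.mk its).insert k v = PySem.Dict.mk (its ++ [(k, v)]) := by
  apply PySem.Dict.ext
  rw [PySem.Dict.items_insert_of_not_contains _ _ (dict_contains_false its k h)]

theorem dict_insert_last {ν : Type} (its : List (Int × ν)) (k : Int) (old v : ν)
    (h : ∀ p ∈ its, p.1 ≠ k) :
    (PySem.Dict.mk (its ++ [(k, old)])).insert k v = PySem.Dict.mk (its ++ [(k, v)]) := by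
  apply PySem.Dict.ext
  have hcont : (PySem.Dict.mk (its ++ [(k, old)])).contains k = true := by
    rw [PySem.Dict.contains_eq_decide_mem_keys, PySem.Dict.keys_mk]
    simp
  rw [PySem.Dict.items_insert_of_contains _ _ hcont]
  show (its ++ [(k, old)]).map (fun p => if p.1 == k then (k, v) else p) = its ++ [(k, v)]
  rw [List.map_append]
  congr 1
  · conv_rhs => rw [← List.map_id its]
    apply List.map_congr_left
    intro p hp
    simp [h p hp]
  · simp

-- ---- B's fold builds the nested chunk dictionary ----
def nestedD (l : List Char) (rn cm : Nat) : PySem.Dict Int (PySem.Dict Int (List Char)) :=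
  PySem.Dict.mk ((chunksC l rn).map (fun p => (p.1, PySem.Dict.mk (chunksC p.2 cm))))

-- mapping over the values keeps a key out of the association list
theorem map_fst_keys {nu : Type} (f : List Char → nu) (its : List (Int × List Char)) (k : Int)
    (h : ∀ p ∈ its, p.1 ≠ k) :
    ∀ p ∈ its.map (fun p => (p.1, f p.2)), p.1 ≠ k := by
  intro p hp
  obtain ⟨q, hq, rfl⟩ := List.mem_map.mp hp
  exact h q hq

theorem step_nestedD (l : List Char) (c : Char) (rn cm : Nat) (hr : 1 ≤ rn) (hc : 1 ≤ cm) :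
    strgAltStep (rn : Int) (cm : Int) (nestedD l rn cm) (((l.length : Nat) : Int), c)
      = nestedD (l ++ [c]) rn cm := by
  have hkey : PySem.Int.floordiv ((l.length : Nat) : Int) (rn : Int) + 1
      = 1 + ((l.length / rn : Nat) : Int) := by
    rw [PySem.Int.floordiv_natCast]; ring
  have h0cm : PySem.Int.floordiv (0 : Int) (cm : Int) = 0 := by
    have h := PySem.Int.floordiv_natCast 0 cm
    simpa using h
  by_cases hd : l.length % rn = 0
  -- the char opens a fresh outer chunk
  · have hfreshC : ∀ p ∈ chunksC l rn, p.1 ≠ 1 + ((l.length / rn : Nat) : Int) := by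
      intro p hp
      obtain ⟨i, hi, hkey0⟩ := mem_chunksC l rn p hp
      rw [cdiv_of_dvd _ rn hr hd] at hi
      rw [hkey0]
      intro heq
      have : i = l.length / rn := by
        exact_mod_cast (by omega : (i : Int) = ((l.length / rn : Nat) : Int))
      omega
    have hfresh := map_fst_keys (fun v => PySem.Dict.mk (chunksC v cm)) _ _ hfreshC
    have hj : PySem.Int.floordiv (PySem.Int.mod ((l.length : Nat) : Int) (rn : Int)) (cm : Int) + 1
        = 1 := by
      rw [PySem.Int.mod_natCast, hd]
      simp [h0cm]
    simp only [strgAltStep, hkey, hj]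
    unfold nestedD
    rw [PySem.Dict.getD_of_not_contains _ _ (dict_contains_false _ _ hfresh)]
    rw [show (PySem.Dict.empty : PySem.Dict Int (List Char)) = PySem.Dict.mk [] from rfl]
    rw [PySem.Dict.getD_of_not_contains _ _ (dict_contains_false ([] : List (Int × List Char)) 1 (by simp))]
    rw [dict_insert_fresh ([] : List (Int × List Char)) 1 _ (by simp), List.nil_append]
    rw [dict_insert_fresh _ _ _ hfresh]
    simp only [chunksC_snoc_dvd l c rn hr hd, List.map_append, List.map_singleton]
    rw [chunksC_single c cm hc]
    simp
  -- the char grows the (partial) last outer chunk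
  · obtain ⟨hl1, hl2⟩ := chunksC_snoc_not_dvd l c rn hr hd
    have htail := drop_div_mul_length l rn hr
    have hFkeysC : ∀ p ∈ (List.range (l.length / rn)).map
        (fun (i : Nat) => (1 + (i : Int), (l.drop (i * rn)).take rn)),
        p.1 ≠ 1 + ((l.length / rn : Nat) : Int) := by
      intro p hp
      obtain ⟨i, hi, hp1⟩ := List.mem_map.mp hp
      have hilt : i < l.length / rn := List.mem_range.mp hi
      rw [← hp1]
      intro heq
      have : i = l.length / rn := by
        exact_mod_cast (by omega : (i : Int) = ((l.length / rn : Nat) : Int))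
      omega
    have hFkeys := map_fst_keys (fun v => PySem.Dict.mk (chunksC v cm)) _ _ hFkeysC
    have hj : PySem.Int.floordiv (PySem.Int.mod ((l.length : Nat) : Int) (rn : Int)) (cm : Int) + 1
        = 1 + (((l.drop (l.length / rn * rn)).length / cm : Nat) : Int) := by
      rw [PySem.Int.mod_natCast, PySem.Int.floordiv_natCast, htail]; ring
    simp only [strgAltStep, hkey, hj]
    unfold nestedD
    simp only [hl1, hl2, List.map_append, List.map_singleton]
    rw [dict_getD_last _ _ _ _ hFkeys]
    -- the updated inner dict is the chunking of the grown last chunk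
    have hinner : (PySem.Dict.mk (chunksC (l.drop (l.length / rn * rn)) cm)).insert
          (1 + (((l.drop (l.length / rn * rn)).length / cm : Nat) : Int))
          ((PySem.Dict.mk (chunksC (l.drop (l.length / rn * rn)) cm)).getD
            (1 + (((l.drop (l.length / rn * rn)).length / cm : Nat) : Int)) [] ++ [c])
        = PySem.Dict.mk (chunksC (l.drop (l.length / rn * rn) ++ [c]) cm) := by
      by_cases hdc : (l.drop (l.length / rn * rn)).length % cm = 0
      · have hifresh : ∀ p ∈ chunksC (l.drop (l.length / rn * rn)) cm,
            p.1 ≠ 1 + (((l.drop (l.length / rn * rn)).length / cm : Nat) : Int) := by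
          intro p hp
          obtain ⟨i, hi, hkey0⟩ := mem_chunksC _ cm p hp
          rw [cdiv_of_dvd _ cm hc hdc] at hi
          rw [hkey0]
          intro heq
          omega
        rw [PySem.Dict.getD_of_not_contains _ _ (dict_contains_false _ _ hifresh)]
        rw [dict_insert_fresh _ _ _ hifresh]
        rw [chunksC_snoc_dvd _ c cm hc hdc]
        simp
      · obtain ⟨hi1, hi2⟩ := chunksC_snoc_not_dvd (l.drop (l.length / rn * rn)) c cm hc hdc
        have hGkeys : ∀ p ∈ (List.range ((l.drop (l.length / rn * rn)).length / cm)).map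
            (fun (i : Nat) => (1 + (i : Int),
              ((l.drop (l.length / rn * rn)).drop (i * cm)).take cm)),
            p.1 ≠ 1 + (((l.drop (l.length / rn * rn)).length / cm : Nat) : Int) := by
          intro p hp
          obtain ⟨i, hi, hp1⟩ := List.mem_map.mp hp
          have hilt : i < (l.drop (l.length / rn * rn)).length / cm := List.mem_range.mp hi
          rw [← hp1]
          intro heq
          omega
        rw [hi1, dict_getD_last _ _ _ _ hGkeys, dict_insert_last _ _ _ _ hGkeys, ← hi2]
    rw [hinner]
    rw [dict_insert_last _ _ _ _ hFkeys]

theorem foldl_step_eq_nestedD (rn cm : Nat) (hr : 1 ≤ rn) (hc : 1 ≤ cm) (l : List Char) :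
    (PySem.List.enumerate l 0).foldl (strgAltStep (rn : Int) (cm : Int)) PySem.Dict.empty
      = nestedD l rn cm := by
  induction l using List.reverseRecOn with
  | nil =>
    rw [show (PySem.List.enumerate ([] : List Char) 0) = [] from rfl]
    rw [List.foldl_nil]
    unfold nestedD chunksC
    rw [show ([] : List Char).length = 0 from rfl, cdiv_zero rn hr]
    rfl
  | append_singleton l c ih =>
    rw [PySem.List.enumerate_append, List.foldl_append, ih,
      PySem.List.enumerate_cons, PySem.List.enumerate_nil,
      List.foldl_cons, List.foldl_nil]
    have := step_nestedD l c rn cm hr hc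
    simpa using this

-- A's inner call renders chunkSpec's chunks as strings
theorem strgInner_eq (s : String) (cm : Nat) (hcm : 1 ≤ cm) :
    strgInner s (cm : Int) = (chunkSpec s.toList cm 1).map (fun q => (q.1, String.ofList q.2)) := by
  have h := strgLoopA_eq_chunkSpec (fun istr => istr) cm hcm
      (s.toList.length + 1) 0 s.toList 1 [] (by omega)
  unfold strgInner
  rw [show ((0 : Nat) : Int) = (0 : Int) from rfl] at h
  simpa using h

-- ===== VERDICT (by name: the statement is the Claim_ definition above) =====
theorem strg_spec : Claim_equal_strg := by
  intro s0 rn cm sub _ hpre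
  unfold Spec_strg strg strg_alt
  rcases hpre with hnil | ⟨_, hrn, hcm⟩
  · have hlen : s0.toList.length = 0 := by simp [hnil]
    rw [strgLoopA]
    have hb : ¬ ((0 : Int) < (s0.toList.length : Int)) := by omega
    rw [if_neg hb, hnil]
    rw [show (PySem.List.enumerate ([] : List Char) 0) = [] from rfl, List.foldl_nil]
    rfl
  · have hr : ((rn.toNat : Nat) : Int) = rn := by omega
    have hcc : ((cm.toNat : Nat) : Int) = cm := by omega
    have hrn' : 1 ≤ rn.toNat := by omega
    have hcm' : 1 ≤ cm.toNat := by omega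
    -- A's side
    have hA := strgLoopA_eq_chunkSpec (fun istr => strgInner istr cm) rn.toNat hrn'
        (s0.toList.length + 1) 0 s0.toList 1 [] (by omega)
    rw [hr] at hA
    simp only [List.drop_zero, List.nil_append] at hA
    rw [show ((0 : Nat) : Int) = (0 : Int) from rfl] at hA
    rw [hA]
    -- B's side
    rw [show strgAltStep rn cm = strgAltStep ((rn.toNat : Nat) : Int) ((cm.toNat : Nat) : Int)
      from by rw [hr, hcc]]
    rw [foldl_step_eq_nestedD rn.toNat cm.toNat hrn' hcm']
    unfold nestedD
    rw [show (PySem.Dict.mk ((chunksC s0.toList rn.toNat).map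
        (fun p => (p.1, PySem.Dict.mk (chunksC p.2 cm.toNat))))).items
      = (chunksC s0.toList rn.toNat).map
        (fun p => (p.1, PySem.Dict.mk (chunksC p.2 cm.toNat))) from rfl]
    rw [List.map_map, chunksC_eq_chunkSpec _ _ hrn']
    apply List.map_congr_left
    intro p _
    show (p.1, strgInner (String.ofList p.2) cm)
        = (p.1, (PySem.Dict.mk (chunksC p.2 cm.toNat)).items.map (fun q => (q.1, String.ofList q.2)))
    rw [show (PySem.Dict.mk (chunksC p.2 cm.toNat)).items = chunksC p.2 cm.toNat from rfl]
    rw [chunksC_eq_chunkSpec _ _ hcm']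
    rw [show strgInner (String.ofList p.2) cm
        = strgInner (String.ofList p.2) ((cm.toNat : Nat) : Int) from by rw [hcc]]
    rw [strgInner_eq _ cm.toNat hcm']
    rw [String.toList_ofList]
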